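-- pv_equiv track=rewrite | github.com/cbmckinstry/PreClustering | app.py | build_user_map
-- ===== SOURCE A (Python) =====
-- def build_user_map(entries: list[dict]) -> dict[str, int]:
--     entries_oldest_first = sorted(entries, key=lambda e: e.get("timestamp", ""))
--
--     first_seen: dict[str, str] = {}
--     for e in entries_oldest_first:
--         did = e.get("device_id")
--         if not did:
--             continue
--         first_seen.setdefault(did, e.get("timestamp", ""))
--
--     ordered = sorted(first_seen.items(), key=lambda x: (x[1], x[0]))
--
--     return {did: i for i, (did, _) in enumerate(ordered, start=1)}
-- ===== SOURCE B (Python) =====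
-- def build_user_map(entries: list[dict]) -> dict[str, int]:
--     # One linear pass keeping the minimum timestamp per device (no sort of all
--     # entries), then assign ids by repeatedly extracting the (ts, id)-minimal
--     # device (selection, no library sort).
--     best: dict[str, str] = {}
--     for e in entries:
--         did = e.get("device_id")
--         if not did:
--             continue
--         ts = e.get("timestamp", "")
--         if did not in best or ts < best[did]:
--             best[did] = ts
--     items = list(best.items())
--     result: dict[str, int] = {}
--     rank = 1
--     while items:
--         m = min(items, key=lambda x: (x[1], x[0]))
--         items.remove(m)
--         result[m[0]] = rank
--         rank += 1
--     return result
-- ===== Notes on version B (the rewrite author's own statement) =====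
-- stated objective: alternative
-- what changed: Instead of sorting all n entries by timestamp, filling a dict with setdefault and library-sorting its items, B makes one linear min-timestamp pass per device and then assigns ids by repeated minimum extraction (selection) over the d distinct devices, with no sort call at all.
import Mathlib
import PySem

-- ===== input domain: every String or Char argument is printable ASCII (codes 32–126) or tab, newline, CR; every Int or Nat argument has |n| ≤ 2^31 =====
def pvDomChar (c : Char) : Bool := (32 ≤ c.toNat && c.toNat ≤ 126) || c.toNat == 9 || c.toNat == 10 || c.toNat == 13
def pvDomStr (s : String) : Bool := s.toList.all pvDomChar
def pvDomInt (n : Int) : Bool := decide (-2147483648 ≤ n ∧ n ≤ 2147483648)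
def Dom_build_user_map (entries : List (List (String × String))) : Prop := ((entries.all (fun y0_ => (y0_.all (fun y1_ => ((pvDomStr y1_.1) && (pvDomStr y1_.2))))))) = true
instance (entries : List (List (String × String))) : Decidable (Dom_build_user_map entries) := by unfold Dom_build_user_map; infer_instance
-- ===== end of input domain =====

-- B replaces A's sort of all n entries + setdefault pass by one linear
-- min-timestamp pass per device followed by repeated minimum extraction
-- (selection) over the distinct devices, with no sort call.

-- e.get(k) on an entry dict (assoc list, first match)
def pvGet (e : List (String × String)) (k : String) : Option String :=
  (PySem.Dict.mk e).get? k

-- e.get("timestamp", "")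
def pvTs (e : List (String × String)) : String :=
  (pvGet e "timestamp").getD ""

-- ===== PORT A =====
-- A's loop body: first_seen.setdefault(did, e.get("timestamp","")) if did truthy
def stepA (d : PySem.Dict String String) (e : List (String × String)) : PySem.Dict String String :=
  match pvGet e "device_id" with
  | none => d
  | some did => if did = "" then d else d.setdefault did (pvTs e)

def build_user_map (entries : List (List (String × String))) : List (String × Int) :=
  let entries_oldest_first := PySem.List.sorted entries (fun e => pvTs e)
  let first_seen := entries_oldest_first.foldl stepA PySem.Dict.empty
  let ordered := PySem.List.sorted2 first_seen.items (fun x => x.2) (fun x => x.1)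
  (PySem.List.enumerate ordered 1).map (fun p => (p.2.1, p.1))

-- ===== PORT B =====
-- B's first loop: keep the smaller timestamp for did (if did truthy)
def stepB (d : PySem.Dict String String) (e : List (String × String)) : PySem.Dict String String :=
  match pvGet e "device_id" with
  | none => d
  | some did =>
    if did = "" then d
    else
      let ts := pvTs e
      match d.get? did with
      | none => d.insert did ts
      | some prev => if ts < prev then d.insert did ts else d

-- termination helper for B's while-loop: items.remove(m) shrinks the list
theorem remove?_some_length_lt {α : Type} [BEq α] [LawfulBEq α] (xs : List α) (v : α) (rest : List α)
    (h : PySem.List.remove? xs v = some rest) : rest.length < xs.length := by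
  have hmem : v ∈ xs := by
    by_contra hc
    rw [(PySem.List.remove?_eq_none_iff xs v).mpr hc] at h
    simp at h
  rw [PySem.List.remove?_eq_some_erase xs v hmem] at h
  have hrest : rest = xs.erase v := (Option.some_inj.mp h).symm
  have hpos : 0 < xs.length := List.length_pos_of_mem hmem
  rw [hrest, List.length_erase_of_mem hmem]
  omega

-- B's while-loop: m = min(items, key=(ts,id)); items.remove(m); result[m[0]] = rank
def selLoop (items : List (String × String)) (rank : Int) : List (String × Int) :=
  match PySem.List.min2? items (fun x => x.2) (fun x => x.1) with
  | none => []
  | some m =>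
    match hr : PySem.List.remove? items m with
    | none => []   -- unreachable: the minimum is a member of items
    | some rest => (m.1, rank) :: selLoop rest (rank + 1)
termination_by items.length
decreasing_by exact remove?_some_length_lt items m rest hr

def build_user_map_alt (entries : List (List (String × String))) : List (String × Int) :=
  let best := entries.foldl stepB PySem.Dict.empty
  selLoop best.items 1

-- ===== PRECONDITION & SPEC =====
def Spec_build_user_map (entries : List (List (String × String))) (out : List (String × Int)) : Prop := out = build_user_map_alt entries
instance (entries : List (List (String × String))) (out : List (String × Int)) : Decidable (Spec_build_user_map entries out) := by unfold Spec_build_user_map; infer_instance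

-- ===== CLAIM (what is proved, stated in full; the proofs are below) =====
def Claim_equal_build_user_map : Prop := ∀ (entries : List (List (String × String))), Dom_build_user_map entries → Spec_build_user_map entries (build_user_map entries)

-- ===== LEMMAS AND PROOFS =====

-- the lexicographic key (timestamp, device_id) used by both final orderings
def lkey (x : String × String) : Lex (String × String) := toLex (x.2, x.1)

lemma lkey_inj : Function.Injective lkey := by
  intro a b h
  have h2 := congrArg ofLex h
  simp only [lkey, ofLex_toLex, Prod.mk.injEq] at h2
  exact Prod.ext h2.2 h2.1

-- timestamps of the entries that touch key k
def tsList (k : String) (l : List (List (String × String))) : List String :=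
  (l.filter (fun e => decide (pvGet e "device_id" = some k ∧ k ≠ ""))).map pvTs

-- running min with an optional start
def ominFold (o : Option String) (ts : List String) : Option String :=
  ts.foldl (fun o t => some (match o with | none => t | some p => if t < p then t else p)) o

lemma tsList_cons (k : String) (e : List (String × String)) (l : List (List (String × String))) :
    tsList k (e :: l) =
      if pvGet e "device_id" = some k ∧ k ≠ "" then pvTs e :: tsList k l else tsList k l := by
  by_cases h : pvGet e "device_id" = some k ∧ k ≠ "" <;> simp [tsList, h]

lemma foldA_get? (l : List (List (String × String))) (d : PySem.Dict String String) (k : String) :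
    (l.foldl stepA d).get? k = (d.get? k).or (tsList k l).head? := by
  induction l generalizing d with
  | nil => simp [tsList]
  | cons e l ih =>
    rw [List.foldl_cons, ih]
    rcases hdid : pvGet e "device_id" with _ | did
    · have hc : ¬ (pvGet e "device_id" = some k ∧ k ≠ "") := by
        rintro ⟨h1, _⟩; rw [hdid] at h1; simp at h1
      rw [tsList_cons, if_neg hc]
      have : stepA d e = d := by unfold stepA; rw [hdid]
      rw [this]
    · by_cases h0 : did = ""
      · have hc : ¬ (pvGet e "device_id" = some k ∧ k ≠ "") := by
          rintro ⟨h1, h2⟩; rw [hdid] at h1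
          exact h2 ((Option.some_inj.mp h1).symm ▸ h0.symm ▸ rfl)
        rw [tsList_cons, if_neg hc]
        have : stepA d e = d := by
          unfold stepA; rw [hdid]
          exact if_pos h0
        rw [this]
      · have hstep : stepA d e = d.setdefault did (pvTs e) := by
          unfold stepA; rw [hdid]
          exact if_neg h0
        rw [hstep]
        by_cases hk : did = k
        · subst hk
          have hc : pvGet e "device_id" = some did ∧ did ≠ "" := ⟨hdid, h0⟩
          rw [tsList_cons, if_pos hc, PySem.Dict.get?_setdefault_self]
          cases d.get? did <;> simp
        · have hc : ¬ (pvGet e "device_id" = some k ∧ k ≠ "") := by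
            rintro ⟨h1, _⟩; rw [hdid] at h1; exact hk (Option.some_inj.mp h1)
          rw [tsList_cons, if_neg hc,
              PySem.Dict.get?_setdefault_of_ne _ _ (fun h => hk h.symm)]

lemma foldB_get? (l : List (List (String × String))) (d : PySem.Dict String String) (k : String) :
    (l.foldl stepB d).get? k = ominFold (d.get? k) (tsList k l) := by
  induction l generalizing d with
  | nil => simp [tsList, ominFold]
  | cons e l ih =>
    rw [List.foldl_cons, ih]
    rcases hdid : pvGet e "device_id" with _ | did
    · have hc : ¬ (pvGet e "device_id" = some k ∧ k ≠ "") := by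
        rintro ⟨h1, _⟩; rw [hdid] at h1; simp at h1
      rw [tsList_cons, if_neg hc]
      have : stepB d e = d := by unfold stepB; rw [hdid]
      rw [this]
    · by_cases h0 : did = ""
      · have hc : ¬ (pvGet e "device_id" = some k ∧ k ≠ "") := by
          rintro ⟨h1, h2⟩; rw [hdid] at h1
          exact h2 ((Option.some_inj.mp h1).symm ▸ h0.symm ▸ rfl)
        rw [tsList_cons, if_neg hc]
        have : stepB d e = d := by
          unfold stepB; rw [hdid]
          exact if_pos h0
        rw [this]
      · have hstep : stepB d e = (match d.get? did with
            | none => d.insert did (pvTs e)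
            | some prev => if pvTs e < prev then d.insert did (pvTs e) else d) := by
          unfold stepB; rw [hdid]
          exact if_neg h0
        rw [hstep]
        by_cases hk : did = k
        · subst hk
          have hc : pvGet e "device_id" = some did ∧ did ≠ "" := ⟨hdid, h0⟩
          rw [tsList_cons, if_pos hc]
          have hget : (match d.get? did with
              | none => d.insert did (pvTs e)
              | some prev => if pvTs e < prev then d.insert did (pvTs e) else d).get? did
              = some (match d.get? did with
                      | none => pvTs e
                      | some prev => if pvTs e < prev then pvTs e else prev) := by
            rcases hg : d.get? did with _ | prev
            · simp [PySem.Dict.get?_insert_self]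
            · by_cases hlt : pvTs e < prev
              · simp [hlt, PySem.Dict.get?_insert_self]
              · simp [hlt, hg]
          rw [hget]
          show _ = ominFold (d.get? did) (pvTs e :: tsList did l)
          unfold ominFold
          rw [List.foldl_cons]
        · have hc : ¬ (pvGet e "device_id" = some k ∧ k ≠ "") := by
            rintro ⟨h1, _⟩; rw [hdid] at h1; exact hk (Option.some_inj.mp h1)
          rw [tsList_cons, if_neg hc]
          have hget : (match d.get? did with
              | none => d.insert did (pvTs e)
              | some prev => if pvTs e < prev then d.insert did (pvTs e) else d).get? k
              = d.get? k := by
            rcases hg : d.get? did with _ | prev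
            · exact PySem.Dict.get?_insert_of_ne _ _ (fun h => hk h.symm)
            · by_cases hlt : pvTs e < prev
              · simp only [hlt, if_pos]
                exact PySem.Dict.get?_insert_of_ne _ _ (fun h => hk h.symm)
              · simp [hlt]
          rw [hget]

lemma ominFold_some (ts : List String) (a : String) :
    ominFold (some a) ts = some (ts.foldl min a) := by
  induction ts generalizing a with
  | nil => rfl
  | cons t ts ih =>
    unfold ominFold
    rw [List.foldl_cons, List.foldl_cons]
    show ominFold (some (if t < a then t else a)) ts = some (ts.foldl min (min a t))
    rw [ih]
    congr 1
    by_cases h : t < a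
    · rw [if_pos h, min_eq_right h.le]
    · rw [if_neg h, min_eq_left (le_of_not_gt h)]

lemma stepA_nodup_keys (d : PySem.Dict String String) (e : List (String × String))
    (h : d.keys.Nodup) : (stepA d e).keys.Nodup := by
  unfold stepA
  rcases pvGet e "device_id" with _ | did
  · exact h
  · show (if did = "" then d else d.setdefault did (pvTs e)).keys.Nodup
    by_cases h0 : did = ""
    · rwa [if_pos h0]
    · rw [if_neg h0]
      by_cases hc : d.contains did
      · rw [PySem.Dict.setdefault_of_contains _ _ hc]; exact h
      · rw [PySem.Dict.setdefault_of_not_contains _ _ (by simpa using hc)]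
        exact PySem.Dict.nodup_keys_insert _ _ _ h

lemma stepB_nodup_keys (d : PySem.Dict String String) (e : List (String × String))
    (h : d.keys.Nodup) : (stepB d e).keys.Nodup := by
  unfold stepB
  rcases pvGet e "device_id" with _ | did
  · exact h
  · show (if did = "" then d else
      match d.get? did with
      | none => d.insert did (pvTs e)
      | some prev => if pvTs e < prev then d.insert did (pvTs e) else d).keys.Nodup
    by_cases h0 : did = ""
    · rwa [if_pos h0]
    · rw [if_neg h0]
      rcases d.get? did with _ | prev
      · exact PySem.Dict.nodup_keys_insert _ _ _ h
      · show (if pvTs e < prev then d.insert did (pvTs e) else d).keys.Nodup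
        by_cases hlt : pvTs e < prev
        · rw [if_pos hlt]
          exact PySem.Dict.nodup_keys_insert _ _ _ h
        · rwa [if_neg hlt]

lemma fold_nodup_keys (step : PySem.Dict String String → List (String × String) → PySem.Dict String String)
    (hstep : ∀ d e, d.keys.Nodup → (step d e).keys.Nodup)
    (l : List (List (String × String))) (d : PySem.Dict String String)
    (h : d.keys.Nodup) : (l.foldl step d).keys.Nodup := by
  induction l generalizing d with
  | nil => exact h
  | cons e l ih => exact ih _ (hstep _ _ h)

lemma get?_eq (entries : List (List (String × String))) (k : String) :
    (((PySem.List.sorted entries (fun e => pvTs e)).foldl stepA PySem.Dict.empty).get? k)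
      = ((entries.foldl stepB PySem.Dict.empty).get? k) := by
  rw [foldA_get?, foldB_get?, PySem.Dict.get?_empty, Option.none_or]
  have hperm : (tsList k (PySem.List.sorted entries (fun e => pvTs e))).Perm (tsList k entries) := by
    unfold tsList
    exact ((PySem.List.sorted_perm entries (fun e => pvTs e) false).filter _).map _
  have hpw : (tsList k (PySem.List.sorted entries (fun e => pvTs e))).Pairwise (· ≤ ·) := by
    unfold tsList
    rw [List.pairwise_map]
    exact List.Pairwise.sublist List.filter_sublist
      (PySem.List.sorted_pairwise entries (fun e => pvTs e))
  rcases hS : tsList k (PySem.List.sorted entries (fun e => pvTs e)) with _ | ⟨m, rest⟩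
  · rw [hS] at hperm
    rw [← hperm.nil_eq]
    rfl
  · rw [hS] at hperm hpw
    rcases hT : tsList k entries with _ | ⟨t, ts⟩
    · rw [hT] at hperm; exact absurd hperm.symm.nil_eq (by simp)
    · rw [hT] at hperm
      show some m = ominFold (some t) ts
      rw [ominFold_some]
      have hmle : ∀ y ∈ t :: ts, m ≤ y := by
        intro y hy
        rcases List.mem_cons.mp (hperm.mem_iff.mpr hy) with h | h
        · exact le_of_eq h.symm
        · exact (List.pairwise_cons.mp hpw).1 y h
      have hm'le : ∀ y ∈ t :: ts, ts.foldl min t ≤ y := by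
        intro y hy
        rcases List.mem_cons.mp hy with h | h
        · exact h ▸ (PySem.List.foldl_min_le ts t).1
        · exact (PySem.List.foldl_min_le ts t).2 y h
      have hm'mem : ts.foldl min t ∈ t :: ts := by
        rcases PySem.List.foldl_min_mem ts t with h | h
        · rw [h]; exact List.mem_cons_self
        · exact List.mem_cons_of_mem _ h
      have hmmem : m ∈ t :: ts := hperm.mem_iff.mp List.mem_cons_self
      exact congrArg some (le_antisymm (hmle _ hm'mem) (hm'le m hmmem))

-- sorted2 is sorted under the lexicographic (swapped-pair) key
lemma sorted2_eq_sorted_lkey (xs : List (String × String)) :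
    PySem.List.sorted2 xs (fun x => x.2) (fun x => x.1) = PySem.List.sorted xs lkey := by
  rw [PySem.List.sorted_eq_foldl_insertBy]
  unfold PySem.List.sorted2
  have hfun : (fun a b : String × String =>
        decide (a.2 < b.2) || (!decide (b.2 < a.2) && decide (a.1 < b.1)))
      = (fun a b => decide (lkey a < lkey b)) := by
    funext a b
    simp only [lkey, Prod.Lex.lt_iff]
    rcases lt_trichotomy a.2 b.2 with h | h | h
    · simp [h, not_lt_of_gt h]
    · simp [h]
    · simp [h, not_lt_of_gt h, ne_of_gt h]
  simp only [if_neg (by decide : ¬ (false = true)), hfun]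

-- B's min(items, key=(ts,id)) as a fold with an explicit step function
def selStep (acc : Option (String × String)) (x : String × String) : Option (String × String) :=
  match acc with
  | none => some x
  | some m =>
    if (decide (x.2 < m.2) || !decide (m.2 < x.2) && decide (x.1 < m.1)) = true
    then some x else some m

lemma min2?_eq_foldl_selStep (xs : List (String × String)) :
    PySem.List.min2? xs (fun x => x.2) (fun x => x.1) = xs.foldl selStep none := by
  unfold PySem.List.min2?
  congr 1
  funext acc x
  cases acc with
  | none => rfl
  | some m => rfl

lemma selStep_some (a x : String × String) :
    selStep (some a) x = if lkey x < lkey a then some x else some a := by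
  rw [show selStep (some a) x
      = if (decide (x.2 < a.2) || !decide (a.2 < x.2) && decide (x.1 < a.1)) = true
        then some x else some a from rfl]
  have hcond : (decide (x.2 < a.2) || !decide (a.2 < x.2) && decide (x.1 < a.1))
      = decide (lkey x < lkey a) := by
    simp only [lkey, Prod.Lex.lt_iff]
    rcases lt_trichotomy x.2 a.2 with h | h | h
    · simp [h, not_lt_of_gt h]
    · simp [h]
    · simp [h, not_lt_of_gt h, ne_of_gt h]
  rw [hcond]
  by_cases hlt : lkey x < lkey a
  · rw [if_pos (by simp [hlt]), if_pos hlt]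
  · rw [if_neg (by simp [hlt]), if_neg hlt]

-- the fold, started from an already-seen element, returns a minimum
lemma selFold_spec (t : List (String × String)) (a : String × String) :
    ∃ m, t.foldl selStep (some a) = some m ∧ (m = a ∨ m ∈ t) ∧ lkey m ≤ lkey a ∧
      ∀ z ∈ t, lkey m ≤ lkey z := by
  induction t generalizing a with
  | nil => exact ⟨a, rfl, Or.inl rfl, le_refl _, by simp⟩
  | cons x t ih =>
    rw [List.foldl_cons, selStep_some]
    by_cases hlt : lkey x < lkey a
    · rw [if_pos hlt]
      obtain ⟨m, hm, hmem, hle, hall⟩ := ih x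
      exact ⟨m, hm, Or.inr (hmem.elim (fun h => h ▸ List.mem_cons_self)
          (fun h => List.mem_cons_of_mem _ h)),
        le_trans hle hlt.le,
        fun z hz => (List.mem_cons.mp hz).elim (fun h => h ▸ hle) (hall z)⟩
    · rw [if_neg hlt]
      obtain ⟨m, hm, hmem, hle, hall⟩ := ih a
      exact ⟨m, hm, hmem.imp id (fun h => List.mem_cons_of_mem _ h), hle,
        fun z hz => (List.mem_cons.mp hz).elim
          (fun h => h ▸ le_trans hle (le_of_not_gt hlt)) (hall z)⟩

lemma min2?_spec (xs : List (String × String)) (hne : xs ≠ []) :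
    ∃ m, PySem.List.min2? xs (fun x => x.2) (fun x => x.1) = some m ∧ m ∈ xs ∧
      ∀ z ∈ xs, lkey m ≤ lkey z := by
  rcases xs with _ | ⟨a, t⟩
  · exact absurd rfl hne
  · rw [min2?_eq_foldl_selStep, List.foldl_cons,
        show selStep none a = some a from rfl]
    obtain ⟨m, hm, hmem, hle, hall⟩ := selFold_spec t a
    exact ⟨m, hm, hmem.elim (fun h => h ▸ List.mem_cons_self) (fun h => List.mem_cons_of_mem _ h),
      fun z hz => (List.mem_cons.mp hz).elim (fun h => h ▸ hle) (hall z)⟩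

-- A's id assignment: enumerate(ordered, 1) projected to (device, rank)
def rankAssign : List (String × String) → Int → List (String × Int)
  | [], _ => []
  | x :: t, r => (x.1, r) :: rankAssign t (r + 1)

lemma enum_map_eq_rankAssign (l : List (String × String)) (s : Int) :
    (PySem.List.enumerate l s).map (fun p => (p.2.1, p.1)) = rankAssign l s := by
  induction l generalizing s with
  | nil => rfl
  | cons x t ih => rw [PySem.List.enumerate_cons, List.map_cons, ih]; rfl

-- B's selection loop equals the id assignment over the sorted list
lemma selLoop_eq_rankAssign (n : Nat) :
    ∀ (xs : List (String × String)), xs.length = n → xs.Nodup →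
      ∀ (r : Int), selLoop xs r = rankAssign (PySem.List.sorted xs lkey) r := by
  induction n using Nat.strong_induction_on with
  | _ n ih =>
    intro xs hlen hnd r
    by_cases hne : xs = []
    · subst hne; rw [selLoop]; rfl
    · obtain ⟨m, hm, hmem, hmin⟩ := min2?_spec xs hne
      rcases hs : PySem.List.sorted xs lkey with _ | ⟨m', t'⟩
      · exact absurd ((PySem.List.sorted_eq_nil_iff xs lkey false).mp hs) hne
      have hperm : (m' :: t').Perm xs := hs ▸ PySem.List.sorted_perm xs lkey false
      have hm'mem : m' ∈ xs := hperm.mem_iff.mp List.mem_cons_self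
      have hmm' : m = m' := by
        apply lkey_inj
        exact le_antisymm (hmin m' hm'mem) (PySem.List.key_head_sorted_le xs lkey hs m hmem)
      have hrm : PySem.List.remove? xs m = some (xs.erase m) :=
        PySem.List.remove?_eq_some_erase xs m hmem
      rw [selLoop, hm]
      have hepm : t'.Perm (xs.erase m) := by
        have h1 := hperm.erase m'
        rw [List.erase_cons_head] at h1
        rw [hmm']
        exact h1
      have hnd' : (m' :: t').Nodup := hperm.nodup_iff.mpr hnd
      have hpwlt : t'.Pairwise (fun a b => lkey a < lkey b) := by
        have hle : (m' :: t').Pairwise (fun a b => lkey a ≤ lkey b) :=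
          hs ▸ PySem.List.sorted_pairwise xs lkey
        have := (List.pairwise_cons.mp hle).2.and (List.pairwise_cons.mp hnd').2
        exact this.imp (fun h => lt_of_le_of_ne h.1 (fun he => h.2 (lkey_inj he)))
      have hsort' : PySem.List.sorted (xs.erase m) lkey = t' :=
        PySem.List.sorted_eq_of_perm_of_pairwise_lt _ _ _ hepm hpwlt
      have hlen' : (xs.erase m).length < n := by
        have hpos : 0 < xs.length := List.length_pos_of_mem hmem
        rw [← hlen, List.length_erase_of_mem hmem]
        omega
      split
      · next heq => simp at heq
      · next m2 heq =>
          have hm2 : m = m2 := Option.some_inj.mp heq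
          subst hm2
          split
          · next heq2 => rw [hrm] at heq2; simp at heq2
          · next rest heq2 =>
              rw [hrm] at heq2
              have hrest : xs.erase m = rest := Option.some_inj.mp heq2
              subst hrest
              rw [ih _ hlen' _ rfl (hnd.erase m) (r + 1), hsort', hmm']
              rfl

-- ===== VERDICT (by name: the statement is the Claim_ definition above) =====
theorem build_user_map_spec : Claim_equal_build_user_map := by
  intro entries _
  unfold Spec_build_user_map build_user_map build_user_map_alt
  have ndA := fold_nodup_keys stepA stepA_nodup_keys
      (PySem.List.sorted entries (fun e => pvTs e)) PySem.Dict.empty PySem.Dict.nodup_keys_empty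
  have ndB := fold_nodup_keys stepB stepB_nodup_keys entries PySem.Dict.empty PySem.Dict.nodup_keys_empty
  have hperm : ((PySem.List.sorted entries (fun e => pvTs e)).foldl stepA PySem.Dict.empty).items.Perm
      ((entries.foldl stepB PySem.Dict.empty).items) := by
    rw [List.perm_ext_iff_of_nodup (ndA.of_map _) (ndB.of_map _)]
    rintro ⟨k, v⟩
    rw [← PySem.Dict.get?_eq_some_iff_mem_items _ _ _ ndA,
        ← PySem.Dict.get?_eq_some_iff_mem_items _ _ _ ndB, get?_eq]
  show ((PySem.List.enumerate (PySem.List.sorted2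
      ((PySem.List.sorted entries (fun e => pvTs e)).foldl stepA PySem.Dict.empty).items
      (fun x => x.2) (fun x => x.1)) 1).map (fun p => (p.2.1, p.1)))
    = selLoop ((entries.foldl stepB PySem.Dict.empty).items) 1
  rw [sorted2_eq_sorted_lkey, enum_map_eq_rankAssign,
      selLoop_eq_rankAssign ((entries.foldl stepB PySem.Dict.empty).items).length _ rfl
        (ndB.of_map _) 1,
      PySem.List.sorted_eq_sorted_of_perm _ _ lkey lkey_inj hperm]
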